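-- pv_equiv track=rewrite | github.com/DanielMagen/Project_Euler | problem 206.py | cond
-- ===== SOURCE A (Python) =====
-- def cond(num):
--     num_squared = str(num**2)
--     if len(num_squared) != 19:
--         return False
--     for i in range(9):
--         if num_squared[2*i] != str(i+1)[-1]:
--             return False
--     return True
-- ===== SOURCE B (Python) =====
-- def cond(num):
--     s = str(num ** 2)
--     return len(s) == 19 and s[:17:2] == "123456789"
-- ===== Notes on version B (the rewrite author's own statement) =====
-- stated objective: idiomatic
-- what changed: Replaces A's per-digit index loop with early return (and its str(i+1)[-1] digit computation) by a length test plus a single stride slice of the square's decimal string compared against the literal digit string.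
import Mathlib
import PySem

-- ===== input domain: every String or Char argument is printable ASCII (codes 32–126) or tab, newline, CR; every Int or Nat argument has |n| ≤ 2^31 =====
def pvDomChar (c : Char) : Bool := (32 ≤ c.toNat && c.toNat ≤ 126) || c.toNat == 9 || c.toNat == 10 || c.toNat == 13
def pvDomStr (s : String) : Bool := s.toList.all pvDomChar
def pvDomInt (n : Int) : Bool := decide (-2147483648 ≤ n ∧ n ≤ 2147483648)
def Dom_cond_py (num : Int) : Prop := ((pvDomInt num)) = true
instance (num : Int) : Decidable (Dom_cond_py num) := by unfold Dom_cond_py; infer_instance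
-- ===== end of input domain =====

-- B replaces A's 9-iteration index loop by a length test plus a stride slice s[:17:2] compared to "123456789" (idiomatic; same cost).

-- ===== PORT A =====
-- the for-loop with early return, as structural recursion over range(9);
-- the 'none' match arms are Python's IndexError paths, unreachable under the length-19 guard
def condLoopA (s : List Char) : List Int → Bool
  | [] => true
  | i :: rest =>
    match PySem.List.pyGet? s (2*i), PySem.Str.pyGet? (PySem.Int.toStr (i+1)) (-1) with
    | some c, some d => if c ≠ d then false else condLoopA s rest
    | _, _ => false

def cond_py (num : Int) : Bool :=
  let numSquared := (PySem.Int.toStr (num ^ 2)).toList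
  if numSquared.length ≠ 19 then false
  else condLoopA numSquared (PySem.List.pyRange 0 9 1)

-- ===== PORT B =====
def cond_py_alt (num : Int) : Bool :=
  let s := (PySem.Int.toStr (num ^ 2)).toList
  (s.length == 19) && (PySem.List.slice? s none (some 17) 2 == some ("123456789".toList))

-- ===== PRECONDITION & SPEC =====
def Spec_cond_py (num : Int) (out : Bool) : Prop := out = cond_py_alt num
instance (num : Int) (out : Bool) : Decidable (Spec_cond_py num out) := by unfold Spec_cond_py; infer_instance

-- ===== CLAIM (what is proved, stated in full; the proofs are below) =====
def Claim_equal_cond_py : Prop := ∀ (num : Int), Dom_cond_py num → Spec_cond_py num (cond_py num)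

-- ===== LEMMAS AND PROOFS =====

-- on a string of length 19, A's digit loop agrees with B's stride-slice comparison
theorem condLoopA_eq_slice (s : List Char) (h : s.length = 19) :
    condLoopA s (PySem.List.pyRange 0 9 1)
      = (PySem.List.slice? s none (some 17) 2 == some ("123456789".toList)) := by
  obtain _ | ⟨c0, s⟩ := s
  · simp at h
  obtain _ | ⟨c1, s⟩ := s
  · simp at h
  obtain _ | ⟨c2, s⟩ := s
  · simp at h
  obtain _ | ⟨c3, s⟩ := s
  · simp at h
  obtain _ | ⟨c4, s⟩ := s
  · simp at h
  obtain _ | ⟨c5, s⟩ := s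
  · simp at h
  obtain _ | ⟨c6, s⟩ := s
  · simp at h
  obtain _ | ⟨c7, s⟩ := s
  · simp at h
  obtain _ | ⟨c8, s⟩ := s
  · simp at h
  obtain _ | ⟨c9, s⟩ := s
  · simp at h
  obtain _ | ⟨c10, s⟩ := s
  · simp at h
  obtain _ | ⟨c11, s⟩ := s
  · simp at h
  obtain _ | ⟨c12, s⟩ := s
  · simp at h
  obtain _ | ⟨c13, s⟩ := s
  · simp at h
  obtain _ | ⟨c14, s⟩ := s
  · simp at h
  obtain _ | ⟨c15, s⟩ := s
  · simp at h
  obtain _ | ⟨c16, s⟩ := s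
  · simp at h
  obtain _ | ⟨c17, s⟩ := s
  · simp at h
  obtain _ | ⟨c18, s⟩ := s
  · simp at h
  obtain rfl : s = [] := by
    cases s with
    | nil => rfl
    | cons x t => simp at h
  have hr : PySem.List.pyRange 0 9 1 = [0,1,2,3,4,5,6,7,8] := by decide
  have hs : PySem.List.slice? [c0,c1,c2,c3,c4,c5,c6,c7,c8,c9,c10,c11,c12,c13,c14,c15,c16,c17,c18] none (some 17) 2
      = some [c0,c2,c4,c6,c8,c10,c12,c14,c16] := by rfl
  have hd1 : PySem.Int.toChars 1 = ['1'] := by decide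
  have hd2 : PySem.Int.toChars 2 = ['2'] := by decide
  have hd3 : PySem.Int.toChars 3 = ['3'] := by decide
  have hd4 : PySem.Int.toChars 4 = ['4'] := by decide
  have hd5 : PySem.Int.toChars 5 = ['5'] := by decide
  have hd6 : PySem.Int.toChars 6 = ['6'] := by decide
  have hd7 : PySem.Int.toChars 7 = ['7'] := by decide
  have hd8 : PySem.Int.toChars 8 = ['8'] := by decide
  have hd9 : PySem.Int.toChars 9 = ['9'] := by decide
  rw [hr, hs]
  simp [condLoopA, PySem.List.pyGet?, PySem.List.pyIdx?, hd1, hd2, hd3, hd4, hd5, hd6, hd7, hd8, hd9]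
  rfl

-- A's guarded loop equals B's boolean conjunction, for any character list
theorem cond_lists (s : List Char) :
    (if s.length ≠ 19 then false else condLoopA s (PySem.List.pyRange 0 9 1))
      = ((s.length == 19) && (PySem.List.slice? s none (some 17) 2 == some ("123456789".toList))) := by
  by_cases h : s.length = 19
  · rw [if_neg (by simp [h]), condLoopA_eq_slice s h]
    simp [h]
  · simp [h]

-- ===== VERDICT (by name: the statement is the Claim_ definition above) =====
theorem cond_py_spec : Claim_equal_cond_py := by
  intro num _
  unfold Spec_cond_py cond_py cond_py_alt
  exact cond_lists _
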